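-- pv_equiv track=rewrite | github.com/MrBrantCode/unitest_baseline | mut_generate/mist_train_cf/cf_81750/solution.py | sort_negatives
-- ===== SOURCE A (Python) =====
-- def sort_negatives(num_list):
--     # Separate negative numbers and sort them
--     sorted_negatives = sorted(x for x in num_list if x < 0)
--
--     j = 0
--     # Replace negative numbers with sorted negative numbers in original list
--     for i in range(len(num_list)):
--         if num_list[i] < 0:
--             num_list[i] = sorted_negatives[j]
--             j += 1
--
--     return num_list
-- ===== SOURCE B (Python) =====
-- def sort_negatives(num_list):
--     # In-place selection sort restricted to the slots holding negatives:
--     # no separate sorted list is built; values are swapped within num_list.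
--     neg = [i for i in range(len(num_list)) if num_list[i] < 0]
--     for a in range(len(neg)):
--         m = a
--         for b in range(a + 1, len(neg)):
--             if num_list[neg[b]] < num_list[neg[m]]:
--                 m = b
--         num_list[neg[a]], num_list[neg[m]] = num_list[neg[m]], num_list[neg[a]]
--     return num_list
-- ===== Notes on version B (the rewrite author's own statement) =====
-- stated objective: alternative
-- what changed: A builds a separately sorted list of the negatives (library sort) and writes it back over the negative slots in one pass; B never builds a sorted list at all: it selection-sorts in place, repeatedly finding the minimum remaining negative and swapping it into the next negative slot, trading A's O(n log n) sort for O(k^2) swaps within the original list.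
import Mathlib
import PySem

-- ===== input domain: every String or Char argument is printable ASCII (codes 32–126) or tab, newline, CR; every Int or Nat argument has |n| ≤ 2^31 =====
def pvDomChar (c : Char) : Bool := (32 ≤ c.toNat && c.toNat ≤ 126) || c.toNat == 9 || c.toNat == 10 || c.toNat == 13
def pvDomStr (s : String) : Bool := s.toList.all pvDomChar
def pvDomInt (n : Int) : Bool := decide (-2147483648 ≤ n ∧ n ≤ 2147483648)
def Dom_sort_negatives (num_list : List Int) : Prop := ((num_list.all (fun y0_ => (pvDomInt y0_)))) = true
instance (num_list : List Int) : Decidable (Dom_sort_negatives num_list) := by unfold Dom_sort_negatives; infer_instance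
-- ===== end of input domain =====

-- B replaces A's sort-then-write-back by an in-place selection sort over the
-- negative slots (alternative algorithm, no separate sorted list); both mutate
-- the argument list in place in Python, equivalence here is about the return value.


-- ===== PORT A =====
-- indices i and j are always in range in A (j counts processed negatives,
-- sorted_negatives has one entry per negative), so getD transcribes num_list[i]
-- and sorted_negatives[j] exactly.
def sort_negatives (num_list : List Int) : List Int :=
  let sorted_negatives := PySem.List.sorted (num_list.filter (fun x => decide (x < 0))) id
  ((List.range num_list.length).foldl
    (fun (st : List Int × Nat) i =>
      if st.1.getD i 0 < 0 then (st.1.set i (sorted_negatives.getD st.2 0), st.2 + 1) else st)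
    (num_list, 0)).1

-- ===== PORT B =====
-- body of B's outer loop: inner scan for the argmin over slots a.. , then the
-- simultaneous-assignment swap (RHS read first, then write neg[a], then neg[m])
def selSwap (neg : List Nat) (w : List Int) (a : Nat) : List Int :=
  let m := (List.range' (a + 1) (neg.length - (a + 1))).foldl
    (fun m b => if w.getD (neg.getD b 0) 0 < w.getD (neg.getD m 0) 0 then b else m) a
  let vm := w.getD (neg.getD m 0) 0
  let va := w.getD (neg.getD a 0) 0
  (w.set (neg.getD a 0) vm).set (neg.getD m 0) va

def sort_negatives_alt (num_list : List Int) : List Int :=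
  let neg := (List.range num_list.length).filter (fun i => decide (num_list.getD i 0 < 0))
  (List.range neg.length).foldl (selSwap neg) num_list

-- ===== PRECONDITION & SPEC =====
def Spec_sort_negatives (num_list : List Int) (out : List Int) : Prop := out = sort_negatives_alt num_list
instance (num_list : List Int) (out : List Int) : Decidable (Spec_sort_negatives num_list out) := by unfold Spec_sort_negatives; infer_instance

-- ===== CLAIM (what is proved, stated in full; the proofs are below) =====
def Claim_equal_sort_negatives : Prop := ∀ (num_list : List Int), Dom_sort_negatives num_list → Spec_sort_negatives num_list (sort_negatives num_list)

-- ===== LEMMAS AND PROOFS =====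

-- `idxsUpTo l n` = indices < n holding negatives of l
def idxsUpTo (l : List Int) (n : Nat) : List Nat :=
  (List.range n).filter (fun i => decide (l.getD i 0 < 0))

theorem idxsUpTo_succ (l : List Int) (n : Nat) :
    idxsUpTo l (n + 1) = idxsUpTo l n ++ (if l.getD n 0 < 0 then [n] else []) := by
  simp [idxsUpTo, List.range_succ, List.filter_append]
  split_ifs <;> simp_all

theorem idxsUpTo_lt {l : List Int} {n i : Nat} (h : i ∈ idxsUpTo l n) : i < n := by
  have := List.mem_filter.mp h
  simpa using this.1

theorem map_idxsUpTo (l : List Int) (n : Nat) :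
    (idxsUpTo l n).map (fun i => l.getD i 0) = (l.take n).filter (fun x => decide (x < 0)) := by
  induction n with
  | zero => simp [idxsUpTo]
  | succ n ih =>
    rw [idxsUpTo_succ, List.map_append, ih]
    by_cases hn : n < l.length
    · have htake : l.take (n + 1) = l.take n ++ [l[n]] := List.take_succ_eq_append_getElem hn
      have hg : l.getD n 0 = l[n] := by
        simp [List.getD, List.getElem?_eq_getElem hn]
      rw [htake, List.filter_append, hg]
      split_ifs with h <;> simp [h, List.getElem?_eq_getElem hn]
    · have htake : l.take (n + 1) = l.take n := by
        rw [List.take_of_length_le (by omega), List.take_of_length_le (by omega)]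
      have hg : l.getD n 0 = 0 := by
        simp [List.getD, List.getElem?_eq_none (by omega : l.length ≤ n)]
      rw [htake, hg]
      norm_num

theorem idxsUpTo_length_mono (l : List Int) {n m : Nat} (h : n ≤ m) :
    (idxsUpTo l n).length ≤ (idxsUpTo l m).length := by
  induction m with
  | zero => simp [Nat.le_zero.mp h]
  | succ m ih =>
    by_cases he : n = m + 1
    · simp [he]
    · calc (idxsUpTo l n).length ≤ (idxsUpTo l m).length := ih (by omega)
        _ ≤ (idxsUpTo l (m + 1)).length := by
            rw [idxsUpTo_succ]; simp only [List.length_append]; omega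

-- a fold of writes at positions all ≠ i leaves position i untouched
theorem foldl_set_getD_ne (ps : List (Nat × Int)) (l : List Int) (i : Nat)
    (h : ∀ p ∈ ps, p.1 ≠ i) :
    (ps.foldl (fun l iv => l.set iv.1 iv.2) l).getD i 0 = l.getD i 0 := by
  induction ps generalizing l with
  | nil => rfl
  | cons p ps ih =>
    simp only [List.foldl_cons]
    rw [ih _ (fun q hq => h q (List.mem_cons_of_mem _ hq))]
    simp [List.getD, List.getElem?_set_ne (h p (List.mem_cons_self))]

theorem zip_append_singleton (l1 : List Nat) (a : Nat) (s : List Int)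
    (h : l1.length < s.length) :
    (l1 ++ [a]).zip s = l1.zip s ++ [(a, s.getD l1.length 0)] := by
  induction l1 generalizing s with
  | nil =>
    cases s with
    | nil => simp at h
    | cons v s' => simp [List.getD]
  | cons x xs ih =>
    cases s with
    | nil => simp at h
    | cons v s' =>
      simp only [List.cons_append, List.zip_cons_cons, List.length_cons]
      rw [ih s' (by simpa using h)]
      simp [List.getD]

-- the invariant of A's loop: after processing range n the list equals a
-- scatter of the first writes, and j counts the negatives seen so far
theorem loopA_state (l : List Int) (n : Nat) (hn : n ≤ l.length) :
    ((List.range n).foldl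
      (fun (st : List Int × Nat) i =>
        if st.1.getD i 0 < 0 then
          (st.1.set i ((PySem.List.sorted (l.filter (fun x => decide (x < 0))) id).getD st.2 0), st.2 + 1)
        else st)
      (l, 0))
    = (((idxsUpTo l n).zip (PySem.List.sorted (l.filter (fun x => decide (x < 0))) id)).foldl
        (fun l iv => l.set iv.1 iv.2) l,
       (idxsUpTo l n).length) := by
  set s := PySem.List.sorted (l.filter (fun x => decide (x < 0))) id with hs
  have hslen : s.length = (idxsUpTo l l.length).length := by
    have h1 : s.length = (l.filter (fun x => decide (x < 0))).length := by
      rw [hs]; exact PySem.List.length_sorted _ _ _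
    have h2 := map_idxsUpTo l l.length
    rw [List.take_length] at h2
    have := congrArg List.length h2
    simp only [List.length_map] at this
    omega
  induction n with
  | zero => simp [idxsUpTo]
  | succ n ih =>
    have hn' : n ≤ l.length := by omega
    rw [List.range_succ, List.foldl_append, ih hn']
    simp only [List.foldl_cons, List.foldl_nil]
    have hread : (((idxsUpTo l n).zip s).foldl (fun l iv => l.set iv.1 iv.2) l).getD n 0
        = l.getD n 0 := by
      apply foldl_set_getD_ne
      intro p hp
      have := idxsUpTo_lt (List.of_mem_zip hp).1
      omega
    rw [hread, idxsUpTo_succ]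
    simp only [List.getD] at hread ⊢
    by_cases hneg : l[n]?.getD 0 < 0
    · have hlen : (idxsUpTo l n).length < s.length := by
        have h1 : (idxsUpTo l (n + 1)).length ≤ s.length := by
          rw [hslen]; exact idxsUpTo_length_mono l hn
        rw [idxsUpTo_succ] at h1
        simp only [List.getD] at h1
        rw [if_pos hneg] at h1
        simp at h1
        omega
      rw [if_pos hneg, if_pos hneg, zip_append_singleton _ _ _ hlen, List.foldl_append]
      simp [List.getD]
    · simp [hneg]

-- ---- facts about the scatter fold ----

theorem foldl_set_length (ps : List (Nat × Int)) (l : List Int) :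
    (ps.foldl (fun l iv => l.set iv.1 iv.2) l).length = l.length := by
  induction ps generalizing l with
  | nil => rfl
  | cons p ps ih => simp [List.foldl_cons, ih]

theorem scatter_getD (neg : List Nat) (s l : List Int) (i : Nat)
    (hi : i < neg.length) (hlen : neg.length ≤ s.length)
    (hpw : neg.Pairwise (· < ·)) (hlt : ∀ p ∈ neg, p < l.length) :
    ((neg.zip s).foldl (fun w iv => w.set iv.1 iv.2) l).getD (neg.getD i 0) 0
      = s.getD i 0 := by
  induction neg generalizing s l i with
  | nil => simp at hi
  | cons n0 rest ih =>
    cases s with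
    | nil => simp at hlen
    | cons v0 vs =>
      simp only [List.zip_cons_cons, List.foldl_cons]
      cases i with
      | zero =>
        have hne : ∀ p ∈ rest.zip vs, p.1 ≠ n0 := by
          intro p hp
          have h1 := (List.of_mem_zip hp).1
          have := (List.pairwise_cons.mp hpw).1 p.1 h1
          omega
        rw [show (n0 :: rest).getD 0 0 = n0 from rfl, foldl_set_getD_ne _ _ _ hne]
        have hn0 : n0 < l.length := hlt n0 List.mem_cons_self
        simp [List.getD, hn0]
      | succ i =>
        rw [show (n0 :: rest).getD (i + 1) 0 = rest.getD i 0 from rfl,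
            show (v0 :: vs).getD (i + 1) 0 = vs.getD i 0 from rfl]
        exact ih vs (l.set n0 v0) i (by simpa using hi) (by simpa using hlen)
          (List.pairwise_cons.mp hpw).2
          (fun p hp => by
            have := hlt p (List.mem_cons_of_mem _ hp)
            simpa using this)

-- ---- facts about B's selection fold ----

-- the inner argmin fold
theorem argmin_fold (g : Nat → Int) (m0 s k : Nat) :
    (((List.range' s k).foldl (fun m b => if g b < g m then b else m) m0) = m0
      ∨ (s ≤ (List.range' s k).foldl (fun m b => if g b < g m then b else m) m0
         ∧ (List.range' s k).foldl (fun m b => if g b < g m then b else m) m0 < s + k))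
    ∧ g ((List.range' s k).foldl (fun m b => if g b < g m then b else m) m0) ≤ g m0
    ∧ ∀ b, s ≤ b → b < s + k →
        g ((List.range' s k).foldl (fun m b => if g b < g m then b else m) m0) ≤ g b := by
  induction k generalizing s m0 with
  | zero =>
    refine ⟨Or.inl rfl, le_refl _, fun b hb1 hb2 => ?_⟩
    omega
  | succ k ih =>
    rw [List.range'_succ]
    simp only [List.foldl_cons]
    set m1 := if g s < g m0 then s else m0 with hm1
    obtain ⟨hpos, hle, hall⟩ := ih m1 (s + 1)
    set r := (List.range' (s + 1) k).foldl (fun m b => if g b < g m then b else m) m1 with hr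
    have hm1le : g m1 ≤ g m0 := by
      rw [hm1]; split_ifs with h
      · exact le_of_lt h
      · exact le_refl _
    have hm1s : g m1 ≤ g s := by
      rw [hm1]; split_ifs with h
      · exact le_refl _
      · omega
    refine ⟨?_, le_trans hle hm1le, fun b hb1 hb2 => ?_⟩
    · rcases hpos with h | h
      · rw [h, hm1]
        split_ifs with hc
        · right; omega
        · left; rfl
      · right; omega
    · by_cases hb : b = s
      · rw [hb]; exact le_trans hle hm1s
      · exact hall b (by omega) (by omega)

-- pointwise value of the list after one selSwap step, seen through neg
theorem selSwap_vals (neg : List Nat) (w : List Int) (a m : Nat)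
    (hpw : neg.Pairwise (· < ·)) (hlt : ∀ p ∈ neg, p < w.length)
    (ha : a < neg.length) (hm : m < neg.length) (j : Nat) (hj : j < neg.length) :
    (((w.set (neg.getD a 0) (w.getD (neg.getD m 0) 0)).set (neg.getD m 0) (w.getD (neg.getD a 0) 0))).getD (neg.getD j 0) 0
      = if j = m then w.getD (neg.getD a 0) 0
        else if j = a then w.getD (neg.getD m 0) 0
        else w.getD (neg.getD j 0) 0 := by
  have hnd : neg.Nodup := hpw.nodup
  have ea : neg.getD a 0 = neg[a] := List.getD_eq_getElem _ _ ha
  have em : neg.getD m 0 = neg[m] := List.getD_eq_getElem _ _ hm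
  have ej : neg.getD j 0 = neg[j] := List.getD_eq_getElem _ _ hj
  have hlm : neg[m] < w.length := hlt _ (List.getElem_mem hm)
  have hla : neg[a] < w.length := hlt _ (List.getElem_mem ha)
  have hset_self : ∀ (u : List Int) (i : Nat) (v : Int), i < u.length → (u.set i v).getD i 0 = v := by
    intro u i v h
    simp [List.getD, h]
  have hset_ne : ∀ (u : List Int) (i k : Nat) (v : Int), k ≠ i → (u.set k v).getD i 0 = u.getD i 0 := by
    intro u i k v h
    simp [List.getD, List.getElem?_set_ne h]
  rw [ea, em, ej]
  by_cases hjm : j = m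
  · subst hjm
    rw [if_pos rfl]
    exact hset_self _ _ _ (by simpa using hlm)
  · have hne_m : neg[j] ≠ neg[m] := fun h => hjm ((hnd.getElem_inj_iff).mp h)
    rw [if_neg hjm, hset_ne _ _ _ _ (Ne.symm hne_m)]
    by_cases hja : j = a
    · subst hja
      rw [if_pos rfl]
      exact hset_self _ _ _ hla
    · have hne_a : neg[j] ≠ neg[a] := fun h => hja ((hnd.getElem_inj_iff).mp h)
      rw [if_neg hja, hset_ne _ _ _ _ (Ne.symm hne_a)]

-- swapping two entries of a list is a permutation
theorem set_set_perm (xs : List Int) (a m : Nat) (ha : a < xs.length) (hm : m < xs.length) :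
    ((xs.set a (xs.getD m 0)).set m (xs.getD a 0)).Perm xs := by
  have ea : xs.getD a 0 = xs[a] := List.getD_eq_getElem _ _ ha
  have em : xs.getD m 0 = xs[m] := List.getD_eq_getElem _ _ hm
  rw [ea, em]
  by_cases ham : a = m
  · subst ham
    rw [List.set_set, List.set_getElem_self ha]
  · set ys := xs.set a xs[m] with hys
    have hym : m < ys.length := by simp [hys, hm]
    have h1 : List.Perm (ys.set m xs[a]) (xs[a] :: ys.eraseIdx m) :=
      List.set_perm_cons_eraseIdx hym _
    have hysm : ys[m] = xs[m] := by
      simp [hys, ham]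
    have h2 : List.Perm (xs[m] :: ys.eraseIdx m) ys := by
      have := List.getElem_cons_eraseIdx_perm hym
      rwa [hysm] at this
    have h3 : List.Perm ys (xs[m] :: xs.eraseIdx a) := List.set_perm_cons_eraseIdx ha _
    have h4 : List.Perm (ys.eraseIdx m) (xs.eraseIdx a) :=
      List.Perm.cons_inv (h2.trans h3)
    have h5 : List.Perm (xs[a] :: xs.eraseIdx a) xs := List.getElem_cons_eraseIdx_perm ha
    exact h1.trans ((h4.cons xs[a]).trans h5)

-- getD through set at a different position
theorem getD_set_ne (u : List Int) (i k : Nat) (v : Int) (h : k ≠ i) :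
    (u.set k v).getD i 0 = u.getD i 0 := by
  simp [List.getD, List.getElem?_set_ne h]

-- the outer selection invariant: after a steps the list is a permutation of l
-- concentrated on the neg positions, untouched elsewhere, with the first a
-- selected slots already in weakly increasing order below the rest
theorem sel_invariant (l : List Int) (neg : List Nat)
    (hpw : neg.Pairwise (· < ·)) (hlt : ∀ p ∈ neg, p < l.length) :
    ∀ a, a ≤ neg.length →
    (((List.range a).foldl (selSwap neg) l).length = l.length
    ∧ (∀ p, p ∉ neg → ((List.range a).foldl (selSwap neg) l).getD p 0 = l.getD p 0)
    ∧ ((neg.map (fun i => ((List.range a).foldl (selSwap neg) l).getD i 0)).Perm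
        (neg.map (fun i => l.getD i 0)))
    ∧ (∀ i j, i < j → j < neg.length → i < a →
        ((List.range a).foldl (selSwap neg) l).getD (neg.getD i 0) 0
          ≤ ((List.range a).foldl (selSwap neg) l).getD (neg.getD j 0) 0)) := by
  intro a
  induction a with
  | zero =>
    exact fun _ => ⟨rfl, fun p _ => rfl, List.Perm.refl _,
      fun i j _ _ h => absurd h (Nat.not_lt_zero i)⟩
  | succ a ih =>
    intro ha
    obtain ⟨hlen, huntouched, hperm, hsorted⟩ := ih (by omega)
    rw [List.range_succ, List.foldl_append, List.foldl_cons, List.foldl_nil]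
    set w := (List.range a).foldl (selSwap neg) l with hw
    have ha' : a < neg.length := by omega
    set m := (List.range' (a + 1) (neg.length - (a + 1))).foldl
      (fun m b => if w.getD (neg.getD b 0) 0 < w.getD (neg.getD m 0) 0 then b else m) a with hmdef
    have hstep : selSwap neg w a
        = (w.set (neg.getD a 0) (w.getD (neg.getD m 0) 0)).set (neg.getD m 0)
            (w.getD (neg.getD a 0) 0) := rfl
    have harg : (m = a ∨ (a + 1 ≤ m ∧ m < (a + 1) + (neg.length - (a + 1))))
        ∧ w.getD (neg.getD m 0) 0 ≤ w.getD (neg.getD a 0) 0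
        ∧ ∀ b, a + 1 ≤ b → b < (a + 1) + (neg.length - (a + 1)) →
            w.getD (neg.getD m 0) 0 ≤ w.getD (neg.getD b 0) 0 :=
      argmin_fold (fun b => w.getD (neg.getD b 0) 0) a (a + 1) (neg.length - (a + 1))
    have ham : a ≤ m := by rcases harg.1 with h | h <;> omega
    have hm2 : m < neg.length := by rcases harg.1 with h | h <;> omega
    have hmin : ∀ b, a ≤ b → b < neg.length → w.getD (neg.getD m 0) 0 ≤ w.getD (neg.getD b 0) 0 := by
      intro b hb1 hb2
      by_cases hb : b = a
      · rw [hb]; exact harg.2.1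
      · exact harg.2.2 b (by omega) (by omega)
    have hlt' : ∀ p ∈ neg, p < w.length := fun p hp => by rw [hlen]; exact hlt p hp
    have hvals : ∀ j, j < neg.length →
        ((w.set (neg.getD a 0) (w.getD (neg.getD m 0) 0)).set (neg.getD m 0)
            (w.getD (neg.getD a 0) 0)).getD (neg.getD j 0) 0
          = if j = m then w.getD (neg.getD a 0) 0
            else if j = a then w.getD (neg.getD m 0) 0
            else w.getD (neg.getD j 0) 0 :=
      fun j hj => selSwap_vals neg w a m hpw hlt' ha' hm2 j hj
    have hmem_a : neg.getD a 0 ∈ neg := by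
      rw [List.getD_eq_getElem _ _ ha']; exact List.getElem_mem ha'
    have hmem_m : neg.getD m 0 ∈ neg := by
      rw [List.getD_eq_getElem _ _ hm2]; exact List.getElem_mem hm2
    refine ⟨?_, ?_, ?_, ?_⟩
    · rw [hstep]; simp [hlen]
    · intro p hp
      rw [hstep, getD_set_ne _ _ _ _ (fun h => hp (by rw [← h]; exact hmem_m)),
          getD_set_ne _ _ _ _ (fun h => hp (by rw [← h]; exact hmem_a))]
      exact huntouched p hp
    · have hvm : (neg.map (fun i => w.getD i 0)).getD m 0 = w.getD (neg.getD m 0) 0 := by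
        rw [List.getD_eq_getElem _ _ (by simpa using hm2), List.getElem_map,
            List.getD_eq_getElem _ _ hm2]
      have hva : (neg.map (fun i => w.getD i 0)).getD a 0 = w.getD (neg.getD a 0) 0 := by
        rw [List.getD_eq_getElem _ _ (by simpa using ha'), List.getElem_map,
            List.getD_eq_getElem _ _ ha']
      have hmap : neg.map (fun i => (selSwap neg w a).getD i 0)
          = ((neg.map (fun i => w.getD i 0)).set a (w.getD (neg.getD m 0) 0)).set m
              (w.getD (neg.getD a 0) 0) := by
        apply List.ext_getElem
        · simp
        · intro j hj1 hj2
          have hj : j < neg.length := by simpa using hj1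
          have hval := hvals j hj
          rw [← hstep, List.getD_eq_getElem _ _ hj] at hval
          simp only [List.getElem_map, List.getElem_set]
          rw [hval]
          split_ifs <;> first | rfl | omega
      have hperm' := set_set_perm (neg.map (fun i => w.getD i 0)) a m
        (by simpa using ha') (by simpa using hm2)
      rw [hvm, hva] at hperm'
      rw [hmap]
      exact hperm'.trans hperm
    · intro i j hij hj hia
      have hi : i < neg.length := lt_trans hij hj
      rw [hstep, hvals i hi, hvals j hj]
      by_cases him : i = m
      · have hma : m = a := by omega
        rw [if_pos him, if_neg (by omega : ¬ j = m), if_neg (by omega : ¬ j = a)]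
        have := hmin j (by omega) hj
        rwa [hma] at this
      · rw [if_neg him]
        by_cases hia' : i = a
        · rw [if_pos hia']
          by_cases hjm : j = m
          · rw [if_pos hjm]; exact hmin a (le_refl a) ha'
          · rw [if_neg hjm, if_neg (by omega : ¬ j = a)]
            exact hmin j (by omega) hj
        · have hia2 : i < a := by omega
          rw [if_neg hia']
          by_cases hjm : j = m
          · rw [if_pos hjm]; exact hsorted i a hia2 ha' hia2
          · rw [if_neg hjm]
            by_cases hja : j = a
            · rw [if_pos hja]
              exact hsorted i m (by omega) hm2 hia2
            · rw [if_neg hja]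
              exact hsorted i j hij hj hia2

-- ===== VERDICT (by name: the statement is the Claim_ definition above) =====
theorem sort_negatives_spec : Claim_equal_sort_negatives := by
  intro l _
  show sort_negatives l = sort_negatives_alt l
  unfold sort_negatives sort_negatives_alt
  simp only
  rw [loopA_state l l.length le_rfl,
    show idxsUpTo l l.length = (List.range l.length).filter (fun i => decide (l.getD i 0 < 0))
      from rfl]
  dsimp only
  set neg := (List.range l.length).filter (fun i => decide (l.getD i 0 < 0)) with hneg
  have hpw : neg.Pairwise (· < ·) := (List.pairwise_lt_range).filter _
  have hlt : ∀ p ∈ neg, p < l.length := by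
    intro p hp
    have := (List.mem_filter.mp hp).1
    simpa using this
  set s := PySem.List.sorted (l.filter (fun x => decide (x < 0))) id with hs
  have hvals0 : neg.map (fun i => l.getD i 0) = l.filter (fun x => decide (x < 0)) := by
    have := map_idxsUpTo l l.length
    rw [List.take_length] at this
    exact this
  have hslen : s.length = neg.length := by
    have h1 : s.length = (l.filter (fun x => decide (x < 0))).length := by
      rw [hs]; exact PySem.List.length_sorted _ _ _
    have := congrArg List.length hvals0
    simp only [List.length_map] at this
    omega
  obtain ⟨hlen, huntouched, hperm, hsorted⟩ :=
    sel_invariant l neg hpw hlt neg.length (le_refl _)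
  set w := (List.range neg.length).foldl (selSwap neg) l with hw
  -- B's final values over the negative slots are exactly A's sorted negatives
  have hseq : s = neg.map (fun i => w.getD i 0) := by
    rw [hs]
    apply PySem.List.sorted_id_eq_of_perm_of_pairwise
    · rw [← hvals0]; exact hperm
    · rw [List.pairwise_iff_getElem]
      intro i j hi hj hij
      have hi' : i < neg.length := by simpa using hi
      have hj' : j < neg.length := by simpa using hj
      simp only [List.getElem_map]
      have := hsorted i j hij hj' (by omega)
      rwa [List.getD_eq_getElem _ _ hi', List.getD_eq_getElem _ _ hj'] at this
  -- pointwise comparison of A's scatter with B's in-place result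
  apply List.ext_getElem
  · rw [foldl_set_length, hlen]
  · intro p hp1 hp2
    have hp : p < l.length := by rwa [foldl_set_length] at hp1
    have e1 : ((neg.zip s).foldl (fun l iv => l.set iv.1 iv.2) l)[p]
        = ((neg.zip s).foldl (fun l iv => l.set iv.1 iv.2) l).getD p 0 :=
      (List.getD_eq_getElem _ _ hp1).symm
    have e2 : w[p] = w.getD p 0 := (List.getD_eq_getElem _ _ hp2).symm
    rw [e1, e2]
    by_cases hmem : p ∈ neg
    · obtain ⟨i, hi, hip⟩ := List.getElem_of_mem hmem
      have hgd : neg.getD i 0 = p := by rw [List.getD_eq_getElem _ _ hi, hip]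
      rw [← hgd, scatter_getD neg s l i hi (by omega) hpw hlt]
      have : w.getD (neg.getD i 0) 0 = (neg.map (fun k => w.getD k 0)).getD i 0 := by
        rw [List.getD_eq_getElem (neg.map (fun k => w.getD k 0)) 0 (by simpa using hi),
            List.getElem_map, List.getD_eq_getElem neg 0 hi]
      rw [this, ← hseq]
    · have huz : ∀ q ∈ neg.zip s, q.1 ≠ p := by
        intro q hq
        have := (List.of_mem_zip hq).1
        exact fun h => hmem (h ▸ this)
      rw [foldl_set_getD_ne _ _ _ huz]
      exact (huntouched p hmem).symm
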